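-- pv_equiv track=rewrite | github.com/joseizaias/PythonBrasilPrev | bancoimobBrasilPrev/bancoimob.py | retornaVencedor
-- ===== SOURCE A (Python) =====
-- def retornaVencedor(vencedores, ordemQueJogam):
--     relacaoVencedores = vencedores
--     ordem = ordemQueJogam
--     maiorValor = 0
--     idVencedor = 0
--
--     for index in range(len(ordem) -1, 0, -1):
--
--         if vencedores[ordem[index]]['saldo'] >= maiorValor:
--             maiorValor = vencedores[ordem[index]]['saldo']
--             idVencedor = ordem[index]
--
--     return idVencedor
-- ===== SOURCE B (Python) =====
-- def retornaVencedor(vencedores, ordemQueJogam):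
--     n = len(ordemQueJogam)
--     saldos = [vencedores[ordemQueJogam[i]]['saldo'] for i in range(1, n)]
--     if not saldos:
--         return 0
--     M = max(saldos)
--     if M < 0:
--         return 0
--     for i in range(1, n):
--         if vencedores[ordemQueJogam[i]]['saldo'] == M:
--             return ordemQueJogam[i]
--     return 0
-- ===== Notes on version B (the rewrite author's own statement) =====
-- stated objective: alternative
-- what changed: Replaces A's single backward running-max scan (floored at 0, >= ties) by a forward compute-the-max pass followed by a locate-the-first-achiever pass; both are O(n).
import Mathlib
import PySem

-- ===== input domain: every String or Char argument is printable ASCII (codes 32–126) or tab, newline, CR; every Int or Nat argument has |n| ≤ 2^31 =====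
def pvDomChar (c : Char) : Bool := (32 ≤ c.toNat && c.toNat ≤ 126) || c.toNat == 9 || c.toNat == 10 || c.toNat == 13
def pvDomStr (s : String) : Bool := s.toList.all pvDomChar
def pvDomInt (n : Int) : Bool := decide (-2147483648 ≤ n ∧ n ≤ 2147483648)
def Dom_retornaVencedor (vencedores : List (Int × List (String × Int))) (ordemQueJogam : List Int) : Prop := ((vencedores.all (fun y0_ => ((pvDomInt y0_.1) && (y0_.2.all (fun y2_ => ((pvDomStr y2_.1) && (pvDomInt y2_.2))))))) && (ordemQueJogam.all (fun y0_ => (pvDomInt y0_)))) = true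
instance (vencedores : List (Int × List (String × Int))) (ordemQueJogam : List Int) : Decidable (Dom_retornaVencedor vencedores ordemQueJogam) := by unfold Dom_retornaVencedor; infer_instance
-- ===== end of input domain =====

-- B replaces A's single backward running-max scan by two forward passes (compute the max, then
-- locate its first achiever); alternative decomposition, same O(n) cost, return value only.

-- ===== PORT A =====
-- vencedores[k]['saldo'] (dict lookups; Pre_ guarantees both keys exist, so getD's default is never the result)
def pvSaldoA (vencedores : List (Int × List (String × Int))) (k : Int) : Int :=
  PySem.Dict.getD (PySem.Dict.mk (PySem.Dict.getD (PySem.Dict.mk vencedores) k [])) "saldo" 0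

def retornaVencedor (vencedores : List (Int × List (String × Int))) (ordemQueJogam : List Int) : Int :=
  ((PySem.List.pyRange ((ordemQueJogam.length : Int) - 1) 0 (-1)).foldl
    (fun (st : Int × Int) index =>
      if st.1 ≤ pvSaldoA vencedores (PySem.List.pyGetD ordemQueJogam index 0)
      then (pvSaldoA vencedores (PySem.List.pyGetD ordemQueJogam index 0),
            PySem.List.pyGetD ordemQueJogam index 0)
      else st)
    (0, 0)).2

-- ===== PORT B =====
def pvSaldoB (vencedores : List (Int × List (String × Int))) (k : Int) : Int :=
  PySem.Dict.getD (PySem.Dict.mk (PySem.Dict.getD (PySem.Dict.mk vencedores) k [])) "saldo" 0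

def retornaVencedor_alt (vencedores : List (Int × List (String × Int))) (ordemQueJogam : List Int) : Int :=
  match PySem.List.max? ((PySem.List.pyRange 1 (ordemQueJogam.length : Int) 1).map
      (fun i => pvSaldoB vencedores (PySem.List.pyGetD ordemQueJogam i 0))) (fun x => x) with
  | none => 0
  | some M =>
    if M < 0 then 0
    else
      match (PySem.List.pyRange 1 (ordemQueJogam.length : Int) 1).find?
          (fun i => pvSaldoB vencedores (PySem.List.pyGetD ordemQueJogam i 0) == M) with
      | some i => PySem.List.pyGetD ordemQueJogam i 0
      | none => 0

-- ===== PRECONDITION & SPEC =====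
-- Pre_ excludes exactly the inputs on which Python A raises KeyError: some played index i ≥ 1
-- names a player id missing from vencedores, or that player's dict has no 'saldo' key.
def Pre_retornaVencedor (vencedores : List (Int × List (String × Int))) (ordemQueJogam : List Int) : Prop :=
  ((PySem.List.pyRange 1 (ordemQueJogam.length : Int) 1).all (fun i =>
    match (PySem.Dict.mk vencedores).get? (PySem.List.pyGetD ordemQueJogam i 0) with
    | some d => ((PySem.Dict.mk d).get? "saldo").isSome
    | none => false)) = true
instance (vencedores : List (Int × List (String × Int))) (ordemQueJogam : List Int) : Decidable (Pre_retornaVencedor vencedores ordemQueJogam) := by unfold Pre_retornaVencedor; infer_instance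

def pvWitness_retornaVencedor : (List (Int × List (String × Int))) × List Int :=
  ([(0, [("saldo", 5)]), (1, [("saldo", 5)])], [1, 0, 1])

def Spec_retornaVencedor (vencedores : List (Int × List (String × Int))) (ordemQueJogam : List Int) (out : Int) : Prop := out = retornaVencedor_alt vencedores ordemQueJogam
instance (vencedores : List (Int × List (String × Int))) (ordemQueJogam : List Int) (out : Int) : Decidable (Spec_retornaVencedor vencedores ordemQueJogam out) := by unfold Spec_retornaVencedor; infer_instance

-- ===== CLAIM (what is proved, stated in full; the proofs are below) =====
def Claim_equal_retornaVencedor : Prop := ∀ (vencedores : List (Int × List (String × Int))) (ordemQueJogam : List Int), Dom_retornaVencedor vencedores ordemQueJogam → Pre_retornaVencedor vencedores ordemQueJogam → Spec_retornaVencedor vencedores ordemQueJogam (retornaVencedor vencedores ordemQueJogam)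

-- ===== LEMMAS AND PROOFS =====

-- running max pulled out of a foldl
theorem pv_foldl_max_pull (t : List Int) : ∀ a b : Int,
    List.foldl max (max a b) t = max a (List.foldl max b t) := by
  induction t with
  | nil => intro a b; rfl
  | cons x t ih =>
      intro a b
      simp only [List.foldl_cons, max_assoc]
      exact ih a (max b x)

-- foldr max 0 of a nonempty list is the 0-floored running max
theorem pv_foldr_max_zero (x : Int) (xs : List Int) :
    List.foldr max 0 (x :: xs) = max 0 (List.foldl max x xs) := by
  induction xs generalizing x with
  | nil => simp [max_comm]
  | cons y t ih =>
      simp only [List.foldr_cons] at *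
      rw [ih y, List.foldl_cons, pv_foldl_max_pull t x y, max_left_comm]

-- key lemma: A's backward >=-scan (as a foldr) computes the 0-floored max together with
-- the first index achieving it (0 when none does)
theorem pv_key (s k : Int → Int) (l : List Int) :
    List.foldr (fun i (st : Int × Int) => if st.1 ≤ s i then (s i, k i) else st) (0, 0) l
    = (List.foldr (fun i r => max (s i) r) 0 l,
       match l.find? (fun i => s i == List.foldr (fun i r => max (s i) r) 0 l) with
       | some i => k i
       | none => 0) := by
  induction l with
  | nil => simp
  | cons a t ih =>
      simp only [List.foldr_cons, ih, List.find?_cons]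
      by_cases h : List.foldr (fun i r => max (s i) r) 0 t ≤ s a
      · have hm : max (s a) (List.foldr (fun i r => max (s i) r) 0 t) = s a := max_eq_left h
        simp [h]
      · have hlt : s a < List.foldr (fun i r => max (s i) r) 0 t := lt_of_not_ge h
        have hm : max (s a) (List.foldr (fun i r => max (s i) r) 0 t)
            = List.foldr (fun i r => max (s i) r) 0 t := max_eq_right (le_of_lt hlt)
        have hne : (s a == List.foldr (fun i r => max (s i) r) 0 t) = false := by
          simp [ne_of_lt hlt]
        simp [h, hm, hne]

-- ===== VERDICT (by name: the statement is the Claim_ definition above) =====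
-- cons case of the comparison: A's foldr value vs B's max-then-find value
theorem pv_key2 (s k : Int → Int) (a : Int) (t : List Int) :
    (match (a :: t).find? (fun i => s i == List.foldr (fun i r => max (s i) r) 0 (a :: t)) with
     | some i => k i
     | none => 0)
    = match PySem.List.max? ((a :: t).map s) (fun x => x) with
      | none => 0
      | some M =>
        if M < 0 then 0
        else match (a :: t).find? (fun i => s i == M) with
          | some i => k i
          | none => 0 := by
  have hfr : List.foldr (fun i r => max (s i) r) 0 (a :: t)
      = max 0 (List.foldl max (s a) (t.map s)) := by
    rw [← List.foldr_map, List.map_cons, pv_foldr_max_zero]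
  rw [List.map_cons, PySem.List.max?_id_cons, hfr]
  by_cases hneg : List.foldl max (s a) (t.map s) < 0
  · have h0 : max 0 (List.foldl max (s a) (t.map s)) = 0 := max_eq_left (le_of_lt hneg)
    rw [h0]
    have hfind : (a :: t).find? (fun i => s i == (0 : Int)) = none := by
      rw [List.find?_eq_none]
      intro i hi
      have hle : s i ≤ List.foldl max (s a) (t.map s) := by
        have h := PySem.List.le_foldl_max (t.map s) (s a)
        rcases List.mem_cons.mp hi with rfl | hi'
        · exact h.1
        · exact h.2 (s i) (List.mem_map_of_mem hi')
      simp only [beq_iff_eq]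
      omega
    rw [hfind]
    dsimp only
    rw [if_pos hneg]
  · have h0 : max 0 (List.foldl max (s a) (t.map s)) = List.foldl max (s a) (t.map s) :=
      max_eq_right (not_lt.mp hneg)
    rw [h0]
    dsimp only
    rw [if_neg hneg]

-- A = B, unconditionally on the Lean side (both ports use the same total saldo lookup)
theorem pv_AB (v : List (Int × List (String × Int))) (o : List Int) :
    retornaVencedor v o = retornaVencedor_alt v o := by
  have hsb : pvSaldoB = pvSaldoA := rfl
  unfold retornaVencedor retornaVencedor_alt
  rw [hsb]
  have hrev : PySem.List.pyRange ((o.length : Int) - 1) 0 (-1)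
      = (PySem.List.pyRange 1 (o.length : Int) 1).reverse := by
    rw [PySem.List.pyRange_neg_one_eq_reverse]
    norm_num
  rw [hrev, List.foldl_reverse,
      pv_key (fun i => pvSaldoA v (PySem.List.pyGetD o i 0)) (fun i => PySem.List.pyGetD o i 0)]
  cases hidx : PySem.List.pyRange 1 (o.length : Int) 1 with
  | nil => rfl
  | cons a t =>
      exact pv_key2 (fun i => pvSaldoA v (PySem.List.pyGetD o i 0))
        (fun i => PySem.List.pyGetD o i 0) a t

theorem retornaVencedor_spec : Claim_equal_retornaVencedor := by
  intro v o _ _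
  exact pv_AB v o
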